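-- pv_equiv track=rewrite | github.com/Trillionrick/money_machine | src/brokers/price_fetcher.py | _is_inverse_pair
-- ===== SOURCE A (Python) =====
-- def _is_inverse_pair(base: str, quote: str) -> bool:
--     """Check if this is an inverse pair that needs special handling.
--
--     Example: ETH/stETH (both are ~same value, need ratio calculation)
--     """
--     inverse_groups = [
--         {"ETH", "WETH", "STETH", "RETH", "CBETH", "WSTETH"},  # ETH derivatives (uppercase)
--         {"BTC", "WBTC"},  # BTC derivatives
--     ]
--     for group in inverse_groups:
--         if base in group and quote in group:
--             return True
--     return False
-- ===== SOURCE B (Python) =====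
-- _INVERSE_PAIRS = frozenset(
--     (a, b)
--     for g in (("ETH", "WETH", "STETH", "RETH", "CBETH", "WSTETH"),
--               ("BTC", "WBTC"))
--     for a in g
--     for b in g
-- )
--
--
-- def _is_inverse_pair(base: str, quote: str) -> bool:
--     """Check if this is an inverse pair that needs special handling."""
--     return (base, quote) in _INVERSE_PAIRS
-- ===== Notes on version B (the rewrite author's own statement) =====
-- stated objective: simpler
-- what changed: Instead of scanning the list of symbol groups and testing both symbols against each set, B precomputes the whole inverse-pair relation (the union of each group's cartesian square, 40 ordered pairs) once and the function body is a single membership test of the tuple (base, quote).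
import Mathlib
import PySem

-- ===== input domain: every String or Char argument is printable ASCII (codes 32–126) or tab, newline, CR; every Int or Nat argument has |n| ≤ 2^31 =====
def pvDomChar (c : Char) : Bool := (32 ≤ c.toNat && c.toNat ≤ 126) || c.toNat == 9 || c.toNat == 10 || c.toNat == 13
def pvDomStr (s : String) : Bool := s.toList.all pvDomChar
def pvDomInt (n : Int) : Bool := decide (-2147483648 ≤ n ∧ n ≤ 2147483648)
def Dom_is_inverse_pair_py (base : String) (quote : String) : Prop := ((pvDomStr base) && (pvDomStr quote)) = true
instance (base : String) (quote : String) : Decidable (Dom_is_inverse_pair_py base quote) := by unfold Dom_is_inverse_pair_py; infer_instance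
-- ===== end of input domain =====

-- B precomputes the full inverse-pair relation (each group's cartesian square, as one
-- frozenset of ordered pairs) once, so the function body is a single membership test of
-- the tuple (base, quote) instead of A's loop over groups with two set probes each (objective: simpler).


-- ===== PORT A =====
-- A's list of sets, in source order
def pvInverseGroups : List (PySem.Set String) :=
  [PySem.Set.ofList ["ETH", "WETH", "STETH", "RETH", "CBETH", "WSTETH"],
   PySem.Set.ofList ["BTC", "WBTC"]]

-- the 'for group in inverse_groups: if base in group and quote in group: return True' loop
def pvLoopA (base : String) (quote : String) : List (PySem.Set String) → Bool
  | [] => false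
  | g :: rest =>
      if PySem.Set.contains g base && PySem.Set.contains g quote then true
      else pvLoopA base quote rest

def is_inverse_pair_py (base : String) (quote : String) : Bool :=
  pvLoopA base quote pvInverseGroups

-- ===== PORT B =====
-- the tuple of groups B iterates over in its comprehension
def pvPairGroups : List (List String) :=
  [["ETH", "WETH", "STETH", "RETH", "CBETH", "WSTETH"], ["BTC", "WBTC"]]

-- frozenset((a, b) for g in groups for a in g for b in g)
def pvInversePairs : PySem.Set (String × String) :=
  PySem.Set.ofList
    (pvPairGroups.flatMap (fun g => g.flatMap (fun a => g.map (fun b => (a, b)))))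

def is_inverse_pair_py_alt (base : String) (quote : String) : Bool :=
  PySem.Set.contains pvInversePairs (base, quote)

-- ===== PRECONDITION & SPEC =====
def Spec_is_inverse_pair_py (base : String) (quote : String) (out : Bool) : Prop := out = is_inverse_pair_py_alt base quote
instance (base : String) (quote : String) (out : Bool) : Decidable (Spec_is_inverse_pair_py base quote out) := by unfold Spec_is_inverse_pair_py; infer_instance

-- ===== CLAIM (what is proved, stated in full; the proofs are below) =====
def Claim_equal_is_inverse_pair_py : Prop := ∀ (base : String) (quote : String), Dom_is_inverse_pair_py base quote → Spec_is_inverse_pair_py base quote (is_inverse_pair_py base quote)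

-- ===== LEMMAS AND PROOFS =====

-- A's early-return loop is the existence of a group containing both symbols
theorem pvLoopA_iff (base quote : String) (gs : List (PySem.Set String)) :
    pvLoopA base quote gs = true ↔
      ∃ g ∈ gs, base ∈ g ∧ quote ∈ g := by
  induction gs with
  | nil => simp [pvLoopA]
  | cons g rest ih =>
      simp only [pvLoopA]
      split_ifs with h
      · simp only [Bool.and_eq_true, PySem.Set.contains_iff] at h
        simp [h.1, h.2]
      · simp only [ih, List.mem_cons]  -- loop falls through to the rest
        constructor
        · rintro ⟨g', hg', hb, hq⟩; exact ⟨g', Or.inr hg', hb, hq⟩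
        · rintro ⟨g', hg' | hg', hb, hq⟩
          · subst hg'
            exact absurd (by simp [hb, hq]) h
          · exact ⟨g', hg', hb, hq⟩

-- B's pair-set membership is the same existence statement
theorem pvPairs_iff (base quote : String) :
    is_inverse_pair_py_alt base quote = true ↔
      ∃ g ∈ pvPairGroups, base ∈ g ∧ quote ∈ g := by
  simp only [is_inverse_pair_py_alt, pvInversePairs, PySem.Set.contains_iff,
    PySem.Set.mem_ofList, List.mem_flatMap, List.mem_map]
  constructor
  · rintro ⟨g, hg, a, ha, b, hb, heq⟩
    cases heq
    exact ⟨g, hg, ha, hb⟩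
  · rintro ⟨g, hg, hb, hq⟩
    exact ⟨g, hg, base, hb, quote, hq, rfl⟩

theorem is_inverse_pair_py_eq (base quote : String) :
    is_inverse_pair_py base quote = is_inverse_pair_py_alt base quote := by
  have hiff : is_inverse_pair_py base quote = true ↔ is_inverse_pair_py_alt base quote = true := by
    rw [is_inverse_pair_py, pvLoopA_iff, pvPairs_iff]
    constructor
    · rintro ⟨g, hg, hb, hq⟩
      simp only [pvInverseGroups, List.mem_cons, List.not_mem_nil, or_false] at hg
      rcases hg with rfl | rfl
      · exact ⟨_, by simp [pvPairGroups], (PySem.Set.mem_ofList _ _).mp hb,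
          (PySem.Set.mem_ofList _ _).mp hq⟩
      · exact ⟨_, by simp [pvPairGroups], (PySem.Set.mem_ofList _ _).mp hb,
          (PySem.Set.mem_ofList _ _).mp hq⟩
    · rintro ⟨g, hg, hb, hq⟩
      simp only [pvPairGroups, List.mem_cons, List.not_mem_nil, or_false] at hg
      rcases hg with rfl | rfl
      · exact ⟨_, by simp [pvInverseGroups], (PySem.Set.mem_ofList _ _).mpr hb,
          (PySem.Set.mem_ofList _ _).mpr hq⟩
      · exact ⟨_, by simp [pvInverseGroups], (PySem.Set.mem_ofList _ _).mpr hb,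
          (PySem.Set.mem_ofList _ _).mpr hq⟩
  cases h1 : is_inverse_pair_py base quote <;> cases h2 : is_inverse_pair_py_alt base quote <;>
    simp_all

-- ===== VERDICT (by name: the statement is the Claim_ definition above) =====
theorem is_inverse_pair_py_spec : Claim_equal_is_inverse_pair_py := by
  intro base quote _
  exact is_inverse_pair_py_eq base quote
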